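-- pv_equiv track=rewrite | github.com/sergiosaraiva/fc-kb | md/documentation-library/12-user-knowledge-base/convert_help_files.py | categorize_qa
-- ===== SOURCE A (Python) =====
-- from collections import OrderedDict
--
-- def categorize_qa(qa_pairs):
--     """Group Q&A pairs by topic/category for better organization."""
--     categories = OrderedDict()
--
--     for question, answer in qa_pairs:
--         # Simple categorization based on keywords
--         q_lower = question.lower()
--
--         if any(word in q_lower for word in ["access", "navigate", "where"]):
--             cat = "Navigation"
--         elif any(word in q_lower for word in ["what is", "what does", "indicate", "mean"]):
--             cat = "Concepts"
--         elif any(word in q_lower for word in ["how do", "how to", "steps"]):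
--             cat = "How-To"
--         else:
--             cat = "General"
--
--         if cat not in categories:
--             categories[cat] = []
--         categories[cat].append((question, answer))
--
--     return categories
-- ===== SOURCE B (Python) =====
-- from collections import OrderedDict
--
-- _RULES = [
--     ("Navigation", ("access", "navigate", "where")),
--     ("Concepts", ("what is", "what does", "indicate", "mean")),
--     ("How-To", ("how do", "how to", "steps")),
-- ]
--
-- def _category(question):
--     q = question.lower()
--     for name, keywords in _RULES:
--         if any(k in q for k in keywords):
--             return name
--     return "General"
--
-- def categorize_qa(qa_pairs):
--     """Group Q&A pairs by topic/category for better organization."""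
--     tags = [_category(q) for q, _ in qa_pairs]
--     return OrderedDict(
--         (c, [pair for pair, t in zip(qa_pairs, tags) if t == c])
--         for c in dict.fromkeys(tags))
-- ===== Notes on version B (the rewrite author's own statement) =====
-- stated objective: alternative
-- what changed: A builds the grouping incrementally with an if/elif keyword cascade and an OrderedDict mutated per item; B makes two passes: it tags every pair via first match over an ordered rule table, then emits one (category, filtered-pairs) entry per first-seen tag with dict.fromkeys + zip/filter.
import Mathlib
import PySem

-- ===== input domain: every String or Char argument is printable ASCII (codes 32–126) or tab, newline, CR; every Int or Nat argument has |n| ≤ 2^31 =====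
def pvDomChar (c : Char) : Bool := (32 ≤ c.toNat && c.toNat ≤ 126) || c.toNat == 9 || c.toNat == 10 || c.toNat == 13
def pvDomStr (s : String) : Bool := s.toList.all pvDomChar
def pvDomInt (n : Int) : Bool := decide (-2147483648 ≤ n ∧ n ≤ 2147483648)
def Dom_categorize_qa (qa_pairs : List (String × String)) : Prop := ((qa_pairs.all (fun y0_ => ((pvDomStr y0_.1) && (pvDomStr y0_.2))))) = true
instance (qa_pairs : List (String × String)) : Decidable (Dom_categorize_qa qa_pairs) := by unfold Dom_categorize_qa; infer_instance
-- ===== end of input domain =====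

-- B replaces A's incremental if/elif + dict-building loop by a two-pass group-by (tag every pair
-- via an ordered rule table, then emit one (category, filtered pairs) entry per first-seen tag);
-- objective: alternative structure, same result.

-- ===== PORT A =====
def categorize_qa (qa_pairs : List (String × String)) : List (String × List (String × String)) :=
  (qa_pairs.foldl (fun categories p =>
    let q_lower := PySem.Str.lower p.1
    let cat :=
      if ["access","navigate","where"].any (fun word => PySem.Str.isIn word q_lower) then "Navigation"
      else if ["what is","what does","indicate","mean"].any (fun word => PySem.Str.isIn word q_lower) then "Concepts"
      else if ["how do","how to","steps"].any (fun word => PySem.Str.isIn word q_lower) then "How-To"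
      else "General"
    let categories := if categories.contains cat then categories
                      else categories.insert cat ([] : List (String × String))
    categories.modify cat [] (fun l => l ++ [p]))
    PySem.Dict.empty).items

-- ===== PORT B =====
def qaRules : List (String × List String) :=
  [("Navigation", ["access","navigate","where"]),
   ("Concepts", ["what is","what does","indicate","mean"]),
   ("How-To", ["how do","how to","steps"])]

def qaCategory (question : String) : String :=
  let q := PySem.Str.lower question
  match qaRules.find? (fun r => r.2.any (fun k => PySem.Str.isIn k q)) with
  | some r => r.1
  | none => "General"

def categorize_qa_alt (qa_pairs : List (String × String)) : List (String × List (String × String)) :=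
  let tags := qa_pairs.map (fun p => qaCategory p.1)
  (PySem.List.dedup tags).map (fun c =>
    (c, ((qa_pairs.zip tags).filter (fun pt => pt.2 == c)).map (fun pt => pt.1)))

-- ===== PRECONDITION & SPEC =====
def Spec_categorize_qa (qa_pairs : List (String × String)) (out : List (String × List (String × String))) : Prop := out = categorize_qa_alt qa_pairs
instance (qa_pairs : List (String × String)) (out : List (String × List (String × String))) : Decidable (Spec_categorize_qa qa_pairs out) := by unfold Spec_categorize_qa; infer_instance

-- ===== CLAIM (what is proved, stated in full; the proofs are below) =====
def Claim_equal_categorize_qa : Prop := ∀ (qa_pairs : List (String × String)), Dom_categorize_qa qa_pairs → Spec_categorize_qa qa_pairs (categorize_qa qa_pairs)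

-- ===== LEMMAS AND PROOFS =====

-- A's if/elif keyword cascade computes exactly B's first-match over the rule table.
theorem catChain_eq (q : String) :
    (if ["access","navigate","where"].any (fun word => PySem.Str.isIn word (PySem.Str.lower q)) then "Navigation"
     else if ["what is","what does","indicate","mean"].any (fun word => PySem.Str.isIn word (PySem.Str.lower q)) then "Concepts"
     else if ["how do","how to","steps"].any (fun word => PySem.Str.isIn word (PySem.Str.lower q)) then "How-To"
     else "General") = qaCategory q := by
  unfold qaCategory qaRules
  simp only [List.find?, List.any_cons, List.any_nil, Bool.or_false]
  split_ifs <;> simp_all only [Bool.not_eq_true]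

-- A's "if cat not in d: d[cat] = []" followed by append is one modify-with-default.
theorem dict_step_collapse (d : PySem.Dict String (List (String × String))) (k : String) (p : String × String) :
    ((if d.contains k then d else d.insert k []).modify k [] (fun l => l ++ [p]))
      = d.modify k [] (fun l => l ++ [p]) := by
  by_cases h : d.contains k = true
  · simp [h]
  · rw [if_neg h, PySem.Dict.modify, PySem.Dict.modify,
      PySem.Dict.getD_insert_self, PySem.Dict.insert_insert_self,
      PySem.Dict.getD_of_not_contains]
    simpa using h

theorem map_pair_filter (qa : List (String × String)) (c : String) :
    ((qa.map (fun p => (qaCategory p.1, p))).filter (fun q => q.1 == c)).map (fun q => q.2)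
      = qa.filter (fun p => qaCategory p.1 == c) := by
  induction qa with
  | nil => rfl
  | cons p t ih =>
    by_cases h : qaCategory p.1 == c <;> simp [h, ih]

theorem zip_tag_filter (qa : List (String × String)) (c : String) :
    ((qa.zip (qa.map (fun p => qaCategory p.1))).filter (fun pt => pt.2 == c)).map (fun pt => pt.1)
      = qa.filter (fun p => qaCategory p.1 == c) := by
  induction qa with
  | nil => rfl
  | cons p t ih =>
    by_cases h : qaCategory p.1 == c <;> simp [h, ih]

theorem categorize_qa_eq_alt (qa : List (String × String)) : categorize_qa qa = categorize_qa_alt qa := by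
  have h1 : categorize_qa qa
      = ((qa.map (fun p => (qaCategory p.1, p))).foldl
          (fun d q => d.modify q.1 [] (fun l => l ++ [q.2])) PySem.Dict.empty).items := by
    unfold categorize_qa
    rw [List.foldl_map]
    congr 1
    apply PySem.List.foldl_congr_mem
    intro acc x _
    simp only
    rw [catChain_eq x.1, dict_step_collapse]
  rw [h1]
  set l := qa.map (fun p => (qaCategory p.1, p)) with hl
  set d := l.foldl (fun d q => d.modify q.1 [] (fun l => l ++ [q.2])) PySem.Dict.empty with hd
  have hnd : d.keys.Nodup := by
    rw [hd]
    exact PySem.Dict.nodup_keys_foldl_modify_key l Prod.fst [] (fun _ q => fun t => t ++ [q.2])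
      PySem.Dict.empty (by simp [PySem.Dict.keys_empty])
  rw [PySem.Dict.items_eq_map_keys d hnd []]
  have hkeys : d.keys = PySem.Set.ofList (qa.map (fun p => qaCategory p.1)) := by
    rw [hd, PySem.Dict.keys_foldl_modify_key, PySem.Dict.keys_empty, PySem.Set.update_nil_left, hl,
      List.map_map]
    rfl
  unfold categorize_qa_alt
  rw [hkeys]
  have hded : PySem.List.dedup (qa.map (fun p => qaCategory p.1))
      = PySem.Set.ofList (qa.map (fun p => qaCategory p.1)) := rfl
  simp only [hded]
  apply List.map_congr_left
  intro c _
  have hget : d.getD c [] = (l.filter (fun q => q.1 == c)).map (fun q => q.2) := by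
    rw [hd, PySem.Dict.getD_foldl_modify_append, PySem.Dict.getD_empty]
    rfl
  rw [hget, hl, map_pair_filter, zip_tag_filter]

-- ===== VERDICT (by name: the statement is the Claim_ definition above) =====
theorem categorize_qa_spec : Claim_equal_categorize_qa := by
  intro qa _
  unfold Spec_categorize_qa
  exact categorize_qa_eq_alt qa
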